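-- pv_equiv track=rewrite | github.com/SEunNGHYun/YSH_Algorithm | 프로그래머스/lv1/82612. 부족한 금액 계산하기/부족한 금액 계산하기.py | solution
-- ===== SOURCE A (Python) =====
-- def solution(price, money, count):
--     total_price = 0
--     for m in range(1, count+1):
--         total_price += price * m
--     if (total_price - money) >= 0 :
--         return (total_price - money)
--     else:
--         return 0
-- ===== SOURCE B (Python) =====
-- def solution(price, money, count):
--     n = count if count > 0 else 0
--     total = price * n * (n + 1) // 2
--     shortfall = total - money
--     return shortfall if shortfall > 0 else 0
-- ===== Notes on version B (the rewrite author's own statement) =====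
-- stated objective: faster
-- what changed: Replaces the O(count) summation loop with the closed-form arithmetic-series formula price*count*(count+1)//2.
import Mathlib
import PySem

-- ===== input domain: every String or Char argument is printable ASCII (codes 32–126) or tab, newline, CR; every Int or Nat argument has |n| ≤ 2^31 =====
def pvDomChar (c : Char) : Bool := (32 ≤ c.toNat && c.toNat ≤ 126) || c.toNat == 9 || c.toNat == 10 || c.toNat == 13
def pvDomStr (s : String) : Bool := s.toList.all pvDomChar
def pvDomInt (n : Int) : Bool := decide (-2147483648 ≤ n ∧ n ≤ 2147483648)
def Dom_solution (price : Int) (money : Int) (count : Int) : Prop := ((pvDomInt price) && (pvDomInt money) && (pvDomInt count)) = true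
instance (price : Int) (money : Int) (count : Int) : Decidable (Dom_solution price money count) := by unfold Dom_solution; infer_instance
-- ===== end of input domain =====

-- B replaces A's O(count) summation loop with the closed-form arithmetic-series formula (objective: faster).

-- ===== PORT A =====
def solution (price : Int) (money : Int) (count : Int) : Int :=
  let total_price := (PySem.List.pyRange 1 (count + 1) 1).foldl (fun acc m => acc + price * m) 0
  if total_price - money ≥ 0 then total_price - money else 0

-- ===== PORT B =====
def solution_alt (price : Int) (money : Int) (count : Int) : Int :=
  let n := if count > 0 then count else 0
  let total := PySem.Int.floordiv (price * n * (n + 1)) 2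
  let shortfall := total - money
  if shortfall > 0 then shortfall else 0

-- ===== PRECONDITION & SPEC =====
def Spec_solution (price : Int) (money : Int) (count : Int) (out : Int) : Prop := out = solution_alt price money count
instance (price : Int) (money : Int) (count : Int) (out : Int) : Decidable (Spec_solution price money count out) := by unfold Spec_solution; infer_instance

-- ===== CLAIM (what is proved, stated in full; the proofs are below) =====
def Claim_equal_solution : Prop := ∀ (price : Int) (money : Int) (count : Int), Dom_solution price money count → Spec_solution price money count (solution price money count)

-- ===== LEMMAS AND PROOFS =====

theorem pv_sum_loop (price : Int) (n : Nat) : ∀ acc : Int,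
    ((List.range n).map (fun k : Nat => (1 : Int) + (k : Int))).foldl (fun acc m => acc + price * m) acc
      = acc + price * n * (n + 1) / 2 := by
  induction n with
  | zero => intro acc; simp
  | succ n ih =>
    intro acc
    rw [List.range_succ, List.map_append, List.foldl_append, ih]
    simp only [List.map_cons, List.map_nil, List.foldl_cons, List.foldl_nil]
    obtain ⟨k, hk⟩ := Int.even_mul_succ_self (n:Int)
    push_cast
    rw [show price * (n:Int) * ((n:Int) + 1) = price * ((n:Int) * ((n:Int)+1)) by ring, hk]
    have hk2 : ((n:Int)+1) * ((n:Int)+1+1) = 2 * (k + ((n:Int)+1)) := by nlinarith [hk]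
    rw [show price * ((n:Int)+1) * ((n:Int)+1+1) = price * (((n:Int)+1) * ((n:Int)+1+1)) by ring, hk2]
    rw [show price * (k + k) = 2 * (price * k) by ring]
    rw [show price * (2 * (k + ((n:Int)+1))) = 2 * (price * (k + ((n:Int)+1))) by ring]
    rw [Int.mul_ediv_cancel_left _ (by norm_num : (2:Int) ≠ 0),
        Int.mul_ediv_cancel_left _ (by norm_num : (2:Int) ≠ 0)]
    ring

theorem pv_closed (price count : Int) :
    (PySem.List.pyRange 1 (count + 1) 1).foldl (fun acc m => acc + price * m) 0
      = PySem.Int.floordiv (price * (if count > 0 then count else 0) * ((if count > 0 then count else 0) + 1)) 2 := by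
  rw [PySem.List.pyRange_one]
  have hn : (count + 1 - 1) = count := by ring
  rw [hn]
  rw [pv_sum_loop price count.toNat 0]
  rw [PySem.Int.floordiv_eq_ediv_of_pos (by norm_num)]
  split_ifs with h
  · rw [Int.toNat_of_nonneg (le_of_lt h)]; ring_nf
  · have : count.toNat = 0 := Int.toNat_of_nonpos (by omega)
    simp [this]

-- ===== VERDICT (by name: the statement is the Claim_ definition above) =====
theorem solution_spec : Claim_equal_solution := by
  intro price money count _
  unfold Spec_solution solution solution_alt
  simp only []
  rw [pv_closed price count]
  omega
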